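-- pv_equiv track=rewrite | github.com/FPlatz95/HelloPython | todo.py | show_todos
-- ===== SOURCE A (Python) =====
-- def capitalize(todo):
--     todo['level'] = todo['level'].upper()
--     return todo
--
-- def show_todos(todos):
--         output = ("Item     Title       "
--                   "Description          Level\n")
--         important = [capitalize(todo) for todo in todos
--                     if todo['level'].lower() == 'important']
--         unimportant = [capitalize(todo) for todo in todos
--                     if todo['level'].lower() == 'unimportant']
--         medium = [capitalize(todo) for todo in todos
--                     if todo['level'].lower() == 'medium']
--         sorted_todos = (important +
--                         medium +
--                         unimportant)
--
--         for index, todo in enumerate(sorted_todos):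
--             line = str(index+1).ljust(8)
--             for key, length in [('title', 16),
--                                 ('description', 24),
--                                 ('level', 16)]:
--                 line += str(todo[key]).ljust(length)
--             output += line + "\n"
--         return output
-- ===== SOURCE B (Python) =====
-- def show_todos(todos):
--     # One pass over todos: partition into the three priority buckets (uppercasing
--     # each kept todo's 'level' in place, like A), then format with a single join.
--     imp, med, unimp = [], [], []
--     for todo in todos:
--         lvl = todo['level'].lower()
--         if lvl == 'important':
--             todo['level'] = todo['level'].upper()
--             imp.append(todo)
--         elif lvl == 'medium':
--             todo['level'] = todo['level'].upper()
--             med.append(todo)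
--         elif lvl == 'unimportant':
--             todo['level'] = todo['level'].upper()
--             unimp.append(todo)
--     lines = ["Item     Title       Description          Level\n"]
--     for i, todo in enumerate(imp + med + unimp):
--         lines.append(str(i + 1).ljust(8)
--                      + todo['title'].ljust(16)
--                      + todo['description'].ljust(24)
--                      + todo['level'].ljust(16) + "\n")
--     return "".join(lines)
-- ===== Notes on version B (the rewrite author's own statement) =====
-- stated objective: simpler
-- what changed: B replaces A's three separate filter scans and incremental string concatenation with a single partition pass into three buckets plus one join over a list of pre-built lines; both mutate the kept dicts' 'level' in place identically.
import Mathlib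
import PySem

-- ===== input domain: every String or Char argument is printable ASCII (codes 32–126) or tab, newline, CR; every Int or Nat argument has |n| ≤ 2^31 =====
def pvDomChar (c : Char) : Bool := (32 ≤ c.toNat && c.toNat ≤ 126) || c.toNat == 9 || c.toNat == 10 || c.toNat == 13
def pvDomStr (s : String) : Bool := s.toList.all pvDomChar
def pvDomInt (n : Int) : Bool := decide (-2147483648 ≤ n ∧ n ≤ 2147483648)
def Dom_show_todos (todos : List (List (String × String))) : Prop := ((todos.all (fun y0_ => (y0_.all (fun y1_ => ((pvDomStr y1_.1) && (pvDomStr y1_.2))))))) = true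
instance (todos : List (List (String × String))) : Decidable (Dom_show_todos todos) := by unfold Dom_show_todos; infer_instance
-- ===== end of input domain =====

-- B replaces A's three filter scans + incremental string concatenation by a single
-- partition pass into three buckets plus one join of pre-built lines (objective: simpler).
-- Both A and B mutate the kept dicts' 'level' key in place identically (uppercased);
-- the theorems below are about the RETURN value. The ports model the mutation purely:
-- the filter conditions read level.lower(), which the .upper() mutation cannot change,
-- so filtering the original dicts and mapping the 'level'-uppercasing afterwards is
-- exact Python behaviour here.

-- str.ljust(w): pad on the right with spaces to width w (exact; shared string helper)
def pvLjust (cs : List Char) (w : Nat) : List Char := cs ++ List.replicate (w - cs.length) ' '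
def pvHeader : List Char := "Item     Title       Description          Level\n".toList

-- ===== PORT A =====
-- capitalize(todo): todo['level'] = todo['level'].upper()
def pvCapitalize (t : PySem.Dict String String) : PySem.Dict String String :=
  t.insert "level" (PySem.Str.upper (t.getD "level" ""))

def show_todos (todos : List (List (String × String))) : String :=
  let ds := todos.map (fun t => PySem.Dict.ofList t)
  let important := (ds.filter (fun t => PySem.Str.lower (t.getD "level" "") == "important")).map pvCapitalize
  let unimportant := (ds.filter (fun t => PySem.Str.lower (t.getD "level" "") == "unimportant")).map pvCapitalize
  let medium := (ds.filter (fun t => PySem.Str.lower (t.getD "level" "") == "medium")).map pvCapitalize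
  let sorted_todos := important ++ medium ++ unimportant
  String.ofList ((PySem.List.enumerate sorted_todos 0).foldl
    (fun output p =>
      let line := [("title", (16 : Nat)), ("description", 24), ("level", 16)].foldl
        (fun line kl => line ++ pvLjust ((p.2.getD kl.1 "").toList) kl.2)
        (pvLjust (PySem.Int.toChars (p.1 + 1)) 8)
      output ++ (line ++ ['\n'])) pvHeader)

-- ===== PORT B =====
-- one loop iteration of Source B's partition pass (elif chain)
def pvAltStep (acc : List (PySem.Dict String String) × List (PySem.Dict String String) × List (PySem.Dict String String))
    (t : PySem.Dict String String) :
    List (PySem.Dict String String) × List (PySem.Dict String String) × List (PySem.Dict String String) :=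
  let lvl := PySem.Str.lower (t.getD "level" "")
  if lvl == "important" then (acc.1 ++ [t.insert "level" (PySem.Str.upper (t.getD "level" ""))], acc.2.1, acc.2.2)
  else if lvl == "medium" then (acc.1, acc.2.1 ++ [t.insert "level" (PySem.Str.upper (t.getD "level" ""))], acc.2.2)
  else if lvl == "unimportant" then (acc.1, acc.2.1, acc.2.2 ++ [t.insert "level" (PySem.Str.upper (t.getD "level" ""))])
  else acc

-- one formatted line of Source B's second loop (ljust-concatenation incl. trailing newline)
def pvAltLine (i : Int) (t : PySem.Dict String String) : List Char :=
  pvLjust (PySem.Int.toChars (i + 1)) 8 ++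
    (pvLjust ((t.getD "title" "").toList) 16 ++
      (pvLjust ((t.getD "description" "").toList) 24 ++
        (pvLjust ((t.getD "level" "").toList) 16 ++ ['\n'])))

def show_todos_alt (todos : List (List (String × String))) : String :=
  let ds := todos.map (fun t => PySem.Dict.ofList t)
  let acc := ds.foldl pvAltStep ([], [], [])
  -- "".join(lines) over code-point lists is List.flatten (exact)
  String.ofList ((pvHeader :: (PySem.List.enumerate (acc.1 ++ acc.2.1 ++ acc.2.2) 0).map
    (fun p => pvAltLine p.1 p.2)).flatten)

-- ===== PRECONDITION & SPEC =====
-- Pre_ excludes exactly the inputs where the Python A raises KeyError: a todo without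
-- a 'level' key, or a todo of one of the three levels missing 'title' or 'description'.
def Pre_show_todos (todos : List (List (String × String))) : Prop :=
  ∀ t ∈ todos, (PySem.Dict.ofList t).contains "level" = true ∧
    (PySem.Str.lower ((PySem.Dict.ofList t).getD "level" "") ∈ (["important", "medium", "unimportant"] : List String) →
      (PySem.Dict.ofList t).contains "title" = true ∧ (PySem.Dict.ofList t).contains "description" = true)
instance (todos : List (List (String × String))) : Decidable (Pre_show_todos todos) := by unfold Pre_show_todos; infer_instance

def pvWitness_show_todos : (List (List (String × String))) :=
  [[("level", "important"), ("title", "a"), ("description", "b")], [("level", "x")]]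

def Spec_show_todos (todos : List (List (String × String))) (out : String) : Prop := out = show_todos_alt todos
instance (todos : List (List (String × String))) (out : String) : Decidable (Spec_show_todos todos out) := by unfold Spec_show_todos; infer_instance

-- ===== CLAIM (what is proved, stated in full; the proofs are below) =====
def Claim_equal_show_todos : Prop := ∀ (todos : List (List (String × String))), Dom_show_todos todos → Pre_show_todos todos → Spec_show_todos todos (show_todos todos)

-- ===== LEMMAS AND PROOFS =====

-- the three groups as A computes them
def pvImp (ds : List (PySem.Dict String String)) : List (PySem.Dict String String) :=
  (ds.filter (fun t => PySem.Str.lower (t.getD "level" "") == "important")).map pvCapitalize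
def pvMed (ds : List (PySem.Dict String String)) : List (PySem.Dict String String) :=
  (ds.filter (fun t => PySem.Str.lower (t.getD "level" "") == "medium")).map pvCapitalize
def pvUni (ds : List (PySem.Dict String String)) : List (PySem.Dict String String) :=
  (ds.filter (fun t => PySem.Str.lower (t.getD "level" "") == "unimportant")).map pvCapitalize

-- B's single partition pass produces exactly A's three filtered-and-capitalized groups
theorem pvPartition (ds : List (PySem.Dict String String))
    (a b c : List (PySem.Dict String String)) :
    ds.foldl pvAltStep (a, b, c) = (a ++ pvImp ds, b ++ pvMed ds, c ++ pvUni ds) := by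
  induction ds generalizing a b c with
  | nil => simp [pvImp, pvMed, pvUni]
  | cons t ds ih =>
    simp only [List.foldl_cons, pvAltStep, pvImp, pvMed, pvUni, List.filter_cons]
    by_cases h1 : PySem.Str.lower (t.getD "level" "") = "important"
    · simp [h1, ih, pvImp, pvMed, pvUni, pvCapitalize]
    · by_cases h2 : PySem.Str.lower (t.getD "level" "") = "medium"
      · simp [h2, ih, pvImp, pvMed, pvUni, pvCapitalize]
      · by_cases h3 : PySem.Str.lower (t.getD "level" "") = "unimportant"
        · simp [h3, ih, pvImp, pvMed, pvUni, pvCapitalize]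
        · simp [h1, h2, h3, ih, pvImp, pvMed, pvUni]

-- A's formatting loop (accumulating string) equals B's flatten of per-line strings
theorem pvFmt (l : List (Int × PySem.Dict String String)) (init : List Char) :
    l.foldl (fun output p =>
      let line := [("title", (16 : Nat)), ("description", 24), ("level", 16)].foldl
        (fun line kl => line ++ pvLjust ((p.2.getD kl.1 "").toList) kl.2)
        (pvLjust (PySem.Int.toChars (p.1 + 1)) 8)
      output ++ (line ++ ['\n'])) init
    = init ++ (l.map (fun p => pvAltLine p.1 p.2)).flatten := by
  induction l generalizing init with
  | nil => simp
  | cons p l ih =>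
    simp only [List.foldl_cons, List.map_cons, List.flatten_cons]
    simp [pvAltLine, List.foldl, List.append_assoc]

theorem pvPortsEq (todos : List (List (String × String))) :
    show_todos todos = show_todos_alt todos := by
  simp only [show_todos, show_todos_alt]
  rw [pvPartition]
  simp only [List.nil_append]
  rw [pvFmt]
  simp [pvImp, pvMed, pvUni]

-- ===== VERDICT (by name: the statement is the Claim_ definition above) =====
theorem show_todos_spec : Claim_equal_show_todos := by
  intro todos _ _
  unfold Spec_show_todos
  exact pvPortsEq todos
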